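-- pv_equiv track=rewrite | github.com/calderov/coding_interview_problems | Practice/AmazonQuestions/02_AmazonQuestion.py | findMiddleMaximumCapacity
-- ===== SOURCE A (Python) =====
-- def findMiddleMaximumCapacity(capacity):
--     n = len(capacity)
--
--     maxMiddleCapacity = -1
--
--     for a in range(n):
--         for b in range(a + 1, n):
--             for c in range(b + 1, n):
--                 # A triplet of boxes (a, b, c) is said to be sustainable if 0 <= a < b < c <= n-1
--                 # and capacity[a] is a factor of capacity[b], and capacity[b] is a factor
--                 # of capacity[c].
--                 if capacity[b] % capacity[a] == 0 and \
--                    capacity[c] % capacity[b] == 0: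
--                     maxMiddleCapacity = max(maxMiddleCapacity, capacity[b])
--
--     return maxMiddleCapacity
-- ===== SOURCE B (Python) =====
-- def findMiddleMaximumCapacity(capacity):
--     n = len(capacity)
--     maxMiddleCapacity = -1
--     for b in range(1, n - 1):
--         if any(capacity[b] % capacity[a] == 0 for a in range(b)) and \
--            any(capacity[c] % capacity[b] == 0 for c in range(b + 1, n)):
--             maxMiddleCapacity = max(maxMiddleCapacity, capacity[b])
--     return maxMiddleCapacity
-- ===== Notes on version B (the rewrite author's own statement) =====
-- stated objective: faster
-- what changed: Instead of enumerating all triplets a<b<c, B scans each middle index b once, checking with two linear scans whether some left element divides capacity[b] and capacity[b] divides some right element.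
import Mathlib
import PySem

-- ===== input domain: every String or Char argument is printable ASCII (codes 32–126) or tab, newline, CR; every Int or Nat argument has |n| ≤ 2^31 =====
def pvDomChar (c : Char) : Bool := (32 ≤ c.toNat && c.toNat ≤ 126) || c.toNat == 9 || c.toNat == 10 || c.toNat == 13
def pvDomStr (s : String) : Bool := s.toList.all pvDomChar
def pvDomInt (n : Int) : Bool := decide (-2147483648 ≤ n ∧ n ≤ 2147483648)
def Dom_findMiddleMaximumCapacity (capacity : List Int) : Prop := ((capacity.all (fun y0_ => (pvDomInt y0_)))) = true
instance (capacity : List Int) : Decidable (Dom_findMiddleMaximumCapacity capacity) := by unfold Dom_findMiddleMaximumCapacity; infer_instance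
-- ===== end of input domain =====

-- B replaces A's triple loop over all triplets a<b<c by one pass over middle indices b with two
-- linear scans (a left divisor, a right multiple): an asymptotically faster exact re-implementation.


-- ===== PORT A =====
def findMiddleMaximumCapacity (capacity : List Int) : Int :=
  let n : Int := capacity.length
  (PySem.List.pyRange 0 n 1).foldl (fun acc a =>
    (PySem.List.pyRange (a + 1) n 1).foldl (fun acc b =>
      (PySem.List.pyRange (b + 1) n 1).foldl (fun acc c =>
        if PySem.Int.mod (PySem.List.pyGetD capacity b 0) (PySem.List.pyGetD capacity a 0) = 0 ∧
           PySem.Int.mod (PySem.List.pyGetD capacity c 0) (PySem.List.pyGetD capacity b 0) = 0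
        then max acc (PySem.List.pyGetD capacity b 0) else acc) acc) acc) (-1)

-- ===== PORT B =====
def findMiddleMaximumCapacity_alt (capacity : List Int) : Int :=
  let n : Int := capacity.length
  (PySem.List.pyRange 1 (n - 1) 1).foldl (fun best b =>
    if ((PySem.List.pyRange 0 b 1).any fun a =>
          PySem.Int.mod (PySem.List.pyGetD capacity b 0) (PySem.List.pyGetD capacity a 0) == 0) &&
       ((PySem.List.pyRange (b + 1) n 1).any fun c =>
          PySem.Int.mod (PySem.List.pyGetD capacity c 0) (PySem.List.pyGetD capacity b 0) == 0)
    then max best (PySem.List.pyGetD capacity b 0) else best) (-1)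

-- ===== PRECONDITION & SPEC =====
-- Pre_ excludes exactly the inputs where Python A raises ZeroDivisionError: lists of length ≥ 3
-- with a zero anywhere except the last position (such a zero becomes a divisor in some triplet).
def Pre_findMiddleMaximumCapacity (capacity : List Int) : Prop :=
  capacity.length < 3 ∨ ∀ x ∈ capacity.dropLast, x ≠ 0
instance (capacity : List Int) : Decidable (Pre_findMiddleMaximumCapacity capacity) := by
  unfold Pre_findMiddleMaximumCapacity; infer_instance

def pvWitness_findMiddleMaximumCapacity : List Int := [2, 4, 8, 3]

def Spec_findMiddleMaximumCapacity (capacity : List Int) (out : Int) : Prop := out = findMiddleMaximumCapacity_alt capacity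
instance (capacity : List Int) (out : Int) : Decidable (Spec_findMiddleMaximumCapacity capacity out) := by unfold Spec_findMiddleMaximumCapacity; infer_instance

-- ===== CLAIM (what is proved, stated in full; the proofs are below) =====
def Claim_equal_findMiddleMaximumCapacity : Prop := ∀ (capacity : List Int), Dom_findMiddleMaximumCapacity capacity → Pre_findMiddleMaximumCapacity capacity → Spec_findMiddleMaximumCapacity capacity (findMiddleMaximumCapacity capacity)

-- ===== LEMMAS AND PROOFS =====

-- 'if P x then max acc (f x) else acc' folded over l is a running max over the filtered, mapped list
theorem foldl_maxif_eq {α : Type} (P : α → Prop) [DecidablePred P] (f : α → Int) :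
    ∀ (l : List α) (acc : Int),
      l.foldl (fun a x => if P x then max a (f x) else a) acc
        = ((l.filter (fun x => decide (P x))).map f).foldl max acc := by
  intro l
  induction l with
  | nil => intro acc; simp
  | cons x xs ih =>
    intro acc
    by_cases h : P x <;> simp [List.foldl_cons, h, ih]

-- a nested running max collapses to a running max over the flattened list
theorem foldl_foldl_max_eq {α : Type} (L : α → List Int) :
    ∀ (l : List α) (acc : Int),
      l.foldl (fun a x => (L x).foldl max a) acc = (l.flatMap L).foldl max acc := by
  intro l
  induction l with
  | nil => intro acc; simp
  | cons x xs ih => intro acc; simp [List.foldl_cons, List.flatMap_cons, List.foldl_append, ih]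

-- a running max over Int depends only on the SET of elements
theorem foldl_max_ext (l₁ l₂ : List Int) (i : Int) (h : ∀ x, x ∈ l₁ ↔ x ∈ l₂) :
    l₁.foldl max i = l₂.foldl max i := by
  apply le_antisymm
  · rcases PySem.List.foldl_max_mem l₁ i with h1 | h1
    · rw [h1]; exact (PySem.List.le_foldl_max l₂ i).1
    · exact (PySem.List.le_foldl_max l₂ i).2 _ ((h _).1 h1)
  · rcases PySem.List.foldl_max_mem l₂ i with h1 | h1
    · rw [h1]; exact (PySem.List.le_foldl_max l₁ i).1
    · exact (PySem.List.le_foldl_max l₁ i).2 _ ((h _).2 h1)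

-- ===== VERDICT (by name: the statement is the Claim_ definition above) =====
theorem findMiddleMaximumCapacity_spec : Claim_equal_findMiddleMaximumCapacity := by
  intro capacity _ _
  unfold Spec_findMiddleMaximumCapacity findMiddleMaximumCapacity findMiddleMaximumCapacity_alt
  set n : Int := (capacity.length : Int) with hn
  set g : Int → Int := fun i => PySem.List.pyGetD capacity i 0 with hg
  simp only [foldl_maxif_eq, foldl_foldl_max_eq]
  apply foldl_max_ext
  intro x
  simp only [List.mem_flatMap, List.mem_map, List.mem_filter, PySem.List.mem_pyRange_one,
    decide_eq_true_eq, List.any_eq_true, Bool.and_eq_true, beq_iff_eq]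
  constructor
  · rintro ⟨a, ⟨ha0, han⟩, b, ⟨hab, hbn⟩, c, ⟨⟨hbc, hcn⟩, hmod1, hmod2⟩, hx⟩
    exact ⟨b, ⟨⟨by omega, by omega⟩, ⟨a, ⟨by omega, by omega⟩, hmod1⟩,
           ⟨c, ⟨by omega, by omega⟩, hmod2⟩⟩, hx⟩
  · rintro ⟨b, ⟨⟨hb1, hbn⟩, ⟨a, ⟨ha0, hab⟩, hmod1⟩, ⟨c, ⟨hbc, hcn⟩, hmod2⟩⟩, hx⟩
    exact ⟨a, ⟨by omega, by omega⟩, b, ⟨by omega, by omega⟩, c,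
           ⟨⟨by omega, by omega⟩, hmod1, hmod2⟩, hx⟩
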